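-- pv_equiv track=rewrite | github.com/dangerisom/Isom-Lab | github_website/projects/Superdarks/code/3-post_query_informatics/12-clustalo_pairwise_traceback_map_con_to_structure.py | _clustal_like_symbol
-- ===== SOURCE A (Python) =====
-- def _clustal_like_symbol(a: str, b: str) -> str:
--     """Return '*', ':', '.', or ' ' for a pair of residues a,b.
--        - '*' exact match (same letter, not gap, not X)
--        - ':' strong similarity (both in one of strong sets)
--        - '.' weak similarity (both in one of weak sets)
--        - ' ' otherwise or if any gap
--        Note: We do NOT exclude 'X' here; exclusion is handled in metrics.
--     """
--     a = a.upper()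
--     b = b.upper()
--     if a == '-' or b == '-':
--         return ' '
--     if a == b and a != 'X':
--         return '*'
--     # Strong groups (common Clustal groupings)
--     strong_groups = [
--         set("STA"),
--         set("NEQK"),
--         set("NHQK"),
--         set("NDEQ"),
--         set("QHRK"),
--         set("MILV"),
--         set("MILF"),
--         set("FYW"),
--     ]
--     for grp in strong_groups:
--         if a in grp and b in grp:
--             return ':'
--     # Weak groups (approximate)
--     weak_groups = [
--         set("CSA"),
--         set("ATV"),
--         set("SAG"),
--         set("STNK"),
--         set("STPA"),
--         set("SGND"),
--         set("SNDEQK"),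
--         set("NDEQHK"),
--         set("NEQHRK"),
--         set("FVLIM"),
--         set("HFY"),
--     ]
--     for grp in weak_groups:
--         if a in grp and b in grp:
--             return '.'
--     return ' '
-- ===== SOURCE B (Python) =====
-- _STRONG = ("STA", "NEQK", "NHQK", "NDEQ", "QHRK", "MILV", "MILF", "FYW")
-- _WEAK = ("CSA", "ATV", "SAG", "STNK", "STPA", "SGND",
--          "SNDEQK", "NDEQHK", "NEQHRK", "FVLIM", "HFY")
--
--
-- def _index(groups):
--     """Map each residue letter to the set of group indices it appears in."""
--     idx = {}
--     for i, g in enumerate(groups):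
--         for ch in g:
--             idx.setdefault(ch, set()).add(i)
--     return idx
--
--
-- _STRONG_IDX = _index(_STRONG)
-- _WEAK_IDX = _index(_WEAK)
-- _EMPTY = frozenset()
--
--
-- def _clustal_like_symbol(a: str, b: str) -> str:
--     a = a.upper()
--     b = b.upper()
--     if a == '-' or b == '-':
--         return ' '
--     if a == b and a != 'X':
--         return '*'
--     if _STRONG_IDX.get(a, _EMPTY) & _STRONG_IDX.get(b, _EMPTY):
--         return ':'
--     if _WEAK_IDX.get(a, _EMPTY) & _WEAK_IDX.get(b, _EMPTY):
--         return '.'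
--     return ' '
-- ===== Notes on version B (the rewrite author's own statement) =====
-- stated objective: idiomatic
-- what changed: Replaces A's per-pair linear scan over the 8 strong and 11 weak group sets by two module-level dicts mapping each residue letter to its set of group indices, built once, so each call does two lookups and one set intersection per tier instead of scanning all groups.
import Mathlib
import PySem

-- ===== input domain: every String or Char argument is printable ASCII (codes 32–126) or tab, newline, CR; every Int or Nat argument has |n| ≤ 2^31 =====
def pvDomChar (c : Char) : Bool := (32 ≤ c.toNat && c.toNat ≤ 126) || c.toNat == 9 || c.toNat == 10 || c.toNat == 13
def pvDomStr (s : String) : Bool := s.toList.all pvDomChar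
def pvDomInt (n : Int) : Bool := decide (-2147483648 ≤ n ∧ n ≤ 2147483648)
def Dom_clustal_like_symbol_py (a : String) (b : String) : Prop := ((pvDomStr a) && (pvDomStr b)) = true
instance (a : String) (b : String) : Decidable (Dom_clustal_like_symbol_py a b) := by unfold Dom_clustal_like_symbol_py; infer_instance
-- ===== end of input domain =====

-- B replaces A's linear scan over 8 + 11 residue groups by two precomputed letter→group-index
-- maps and a single set intersection per tier (objective: idiomatic/alternative, same exact values).

-- ===== PORT A =====
-- Python set("STA") etc.: only membership is used, so the element lists below model the sets
-- (membership `a in grp` is string equality against the 1-char member strings; exact).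
def pvStrongGroups : List (PySem.Set String) :=
  [["S","T","A"], ["N","E","Q","K"], ["N","H","Q","K"], ["N","D","E","Q"],
   ["Q","H","R","K"], ["M","I","L","V"], ["M","I","L","F"], ["F","Y","W"]]

def pvWeakGroups : List (PySem.Set String) :=
  [["C","S","A"], ["A","T","V"], ["S","A","G"], ["S","T","N","K"], ["S","T","P","A"],
   ["S","G","N","D"], ["S","N","D","E","Q","K"], ["N","D","E","Q","H","K"],
   ["N","E","Q","H","R","K"], ["F","V","L","I","M"], ["H","F","Y"]]

-- the 'for grp in groups: if a in grp and b in grp: return <sym>' loop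
def pvLoopHit (grps : List (PySem.Set String)) (a b : String) : Bool :=
  match grps with
  | [] => false
  | g :: rest => if PySem.Set.contains g a && PySem.Set.contains g b then true else pvLoopHit rest a b

def clustal_like_symbol_py (a : String) (b : String) : String :=
  let a := PySem.Str.upper a
  let b := PySem.Str.upper b
  if a = "-" ∨ b = "-" then " "
  else if a = b ∧ a ≠ "X" then "*"
  else if pvLoopHit pvStrongGroups a b = true then ":"
  else if pvLoopHit pvWeakGroups a b = true then "."
  else " "

-- ===== PORT B =====
def pvStrongList : List String := ["STA","NEQK","NHQK","NDEQ","QHRK","MILV","MILF","FYW"]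
def pvWeakList : List String :=
  ["CSA","ATV","SAG","STNK","STPA","SGND","SNDEQK","NDEQHK","NEQHRK","FVLIM","HFY"]

-- _index(groups): idx.setdefault(ch, set()).add(i) over enumerate(groups)
def pvIndex (groups : List String) : PySem.Dict String (PySem.Set Int) :=
  (PySem.List.enumerate groups).foldl (fun idx p =>
    p.2.toList.foldl (fun idx ch =>
      idx.insert (String.ofList [ch])
        (PySem.Set.add (idx.getD (String.ofList [ch]) PySem.Set.empty) p.1)) idx)
    PySem.Dict.empty

def pvStrongIdx : PySem.Dict String (PySem.Set Int) := pvIndex pvStrongList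
def pvWeakIdx : PySem.Dict String (PySem.Set Int) := pvIndex pvWeakList

def clustal_like_symbol_py_alt (a : String) (b : String) : String :=
  let a := PySem.Str.upper a
  let b := PySem.Str.upper b
  if a = "-" ∨ b = "-" then " "
  else if a = b ∧ a ≠ "X" then "*"
  else if PySem.Set.inter (pvStrongIdx.getD a PySem.Set.empty) (pvStrongIdx.getD b PySem.Set.empty) ≠ [] then ":"
  else if PySem.Set.inter (pvWeakIdx.getD a PySem.Set.empty) (pvWeakIdx.getD b PySem.Set.empty) ≠ [] then "."
  else " "

-- ===== PRECONDITION & SPEC =====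
def Spec_clustal_like_symbol_py (a : String) (b : String) (out : String) : Prop := out = clustal_like_symbol_py_alt a b
instance (a : String) (b : String) (out : String) : Decidable (Spec_clustal_like_symbol_py a b out) := by unfold Spec_clustal_like_symbol_py; infer_instance

-- ===== CLAIM (what is proved, stated in full; the proofs are below) =====
def Claim_equal_clustal_like_symbol_py : Prop := ∀ (a : String) (b : String), Dom_clustal_like_symbol_py a b → Spec_clustal_like_symbol_py a b (clustal_like_symbol_py a b)

-- ===== LEMMAS AND PROOFS =====

-- letters occurring in any strong / weak group (= the keys of the corresponding index dict)
def pvStrongKeys : List String := ["S","T","A","N","E","Q","K","H","D","R","M","I","L","V","F","Y","W"]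
def pvWeakKeys : List String := ["C","S","A","T","V","G","N","K","P","D","E","Q","H","R","F","L","I","M","Y"]

set_option maxRecDepth 4096 in
lemma pvStrongIdx_eq : pvStrongIdx = PySem.Dict.mk
    [("S", [0]), ("T", [0]), ("A", [0]), ("N", [1, 2, 3]), ("E", [1, 3]), ("Q", [1, 2, 3, 4]),
     ("K", [1, 2, 4]), ("H", [2, 4]), ("D", [3]), ("R", [4]), ("M", [5, 6]), ("I", [5, 6]),
     ("L", [5, 6]), ("V", [5]), ("F", [6, 7]), ("Y", [7]), ("W", [7])] := by decide

set_option maxRecDepth 4096 in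
lemma pvWeakIdx_eq : pvWeakIdx = PySem.Dict.mk
    [("C", [0]), ("S", [0, 2, 3, 4, 5, 6]), ("A", [0, 1, 2, 4]), ("T", [1, 3, 4]), ("V", [1, 9]),
     ("G", [2, 5]), ("N", [3, 5, 6, 7, 8]), ("K", [3, 6, 7, 8]), ("P", [4]), ("D", [5, 6, 7]),
     ("E", [6, 7, 8]), ("Q", [6, 7, 8]), ("H", [7, 8, 10]), ("R", [8]), ("F", [9, 10]),
     ("L", [9]), ("I", [9]), ("M", [9]), ("Y", [10])] := by decide

lemma getD_strong_of_not_mem (s : String) (hs : s ∉ pvStrongKeys) :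
    pvStrongIdx.getD s PySem.Set.empty = [] := by
  simp [pvStrongKeys] at hs
  obtain ⟨h1,h2,h3,h4,h5,h6,h7,h8,h9,h10,h11,h12,h13,h14,h15,h16,h17⟩ := hs
  simp [pvStrongIdx_eq, PySem.Dict.getD, PySem.Dict.get?,
    (Ne.symm h1), (Ne.symm h2), (Ne.symm h3), (Ne.symm h4), (Ne.symm h5), (Ne.symm h6),
    (Ne.symm h7), (Ne.symm h8), (Ne.symm h9), (Ne.symm h10), (Ne.symm h11), (Ne.symm h12),
    (Ne.symm h13), (Ne.symm h14), (Ne.symm h15), (Ne.symm h16), (Ne.symm h17), PySem.Set.empty]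

lemma getD_weak_of_not_mem (s : String) (hs : s ∉ pvWeakKeys) :
    pvWeakIdx.getD s PySem.Set.empty = [] := by
  simp [pvWeakKeys] at hs
  obtain ⟨h1,h2,h3,h4,h5,h6,h7,h8,h9,h10,h11,h12,h13,h14,h15,h16,h17,h18,h19⟩ := hs
  simp [pvWeakIdx_eq, PySem.Dict.getD, PySem.Dict.get?,
    (Ne.symm h1), (Ne.symm h2), (Ne.symm h3), (Ne.symm h4), (Ne.symm h5), (Ne.symm h6),
    (Ne.symm h7), (Ne.symm h8), (Ne.symm h9), (Ne.symm h10), (Ne.symm h11), (Ne.symm h12),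
    (Ne.symm h13), (Ne.symm h14), (Ne.symm h15), (Ne.symm h16), (Ne.symm h17), (Ne.symm h18),
    (Ne.symm h19), PySem.Set.empty]

lemma loopHit_false_left (grps : List (PySem.Set String)) (keys : List String) (s t : String)
    (hsub : ∀ g ∈ grps, ∀ x ∈ g, x ∈ keys) (hs : s ∉ keys) :
    pvLoopHit grps s t = false := by
  induction grps with
  | nil => rfl
  | cons g rest ih =>
    have hc : PySem.Set.contains g s = false := by
      cases h : PySem.Set.contains g s with
      | false => rfl
      | true => exact absurd (hsub g (by simp) s ((PySem.Set.contains_iff g s).mp h)) hs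
    unfold pvLoopHit
    rw [hc, Bool.false_and, if_neg (by simp)]
    exact ih (fun g' hg' => hsub g' (by simp [hg']))

lemma loopHit_false_right (grps : List (PySem.Set String)) (keys : List String) (s t : String)
    (hsub : ∀ g ∈ grps, ∀ x ∈ g, x ∈ keys) (ht : t ∉ keys) :
    pvLoopHit grps s t = false := by
  induction grps with
  | nil => rfl
  | cons g rest ih =>
    have hc : PySem.Set.contains g t = false := by
      cases h : PySem.Set.contains g t with
      | false => rfl
      | true => exact absurd (hsub g (by simp) t ((PySem.Set.contains_iff g t).mp h)) ht
    unfold pvLoopHit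
    rw [hc, Bool.and_false, if_neg (by simp)]
    exact ih (fun g' hg' => hsub g' (by simp [hg']))

lemma strong_sub : ∀ g ∈ pvStrongGroups, ∀ x ∈ g, x ∈ pvStrongKeys := by decide

lemma weak_sub : ∀ g ∈ pvWeakGroups, ∀ x ∈ g, x ∈ pvWeakKeys := by decide

set_option maxRecDepth 8192 in
lemma strong_iff_keys : ∀ s ∈ pvStrongKeys, ∀ t ∈ pvStrongKeys,
    ((pvLoopHit pvStrongGroups s t = true) ↔
      PySem.Set.inter (pvStrongIdx.getD s PySem.Set.empty) (pvStrongIdx.getD t PySem.Set.empty) ≠ []) := by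
  decide

set_option maxRecDepth 8192 in
lemma weak_iff_keys : ∀ s ∈ pvWeakKeys, ∀ t ∈ pvWeakKeys,
    ((pvLoopHit pvWeakGroups s t = true) ↔
      PySem.Set.inter (pvWeakIdx.getD s PySem.Set.empty) (pvWeakIdx.getD t PySem.Set.empty) ≠ []) := by
  decide

lemma strong_iff (s t : String) :
    (pvLoopHit pvStrongGroups s t = true) ↔
    PySem.Set.inter (pvStrongIdx.getD s PySem.Set.empty) (pvStrongIdx.getD t PySem.Set.empty) ≠ [] := by
  by_cases hs : s ∈ pvStrongKeys
  · by_cases ht : t ∈ pvStrongKeys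
    · exact strong_iff_keys s hs t ht
    · rw [loopHit_false_right pvStrongGroups pvStrongKeys s t strong_sub ht,
         getD_strong_of_not_mem t ht]
      simp [PySem.Set.inter]
  · rw [loopHit_false_left pvStrongGroups pvStrongKeys s t strong_sub hs,
       getD_strong_of_not_mem s hs]
    simp [PySem.Set.inter]

lemma weak_iff (s t : String) :
    (pvLoopHit pvWeakGroups s t = true) ↔
    PySem.Set.inter (pvWeakIdx.getD s PySem.Set.empty) (pvWeakIdx.getD t PySem.Set.empty) ≠ [] := by
  by_cases hs : s ∈ pvWeakKeys
  · by_cases ht : t ∈ pvWeakKeys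
    · exact weak_iff_keys s hs t ht
    · rw [loopHit_false_right pvWeakGroups pvWeakKeys s t weak_sub ht,
         getD_weak_of_not_mem t ht]
      simp [PySem.Set.inter]
  · rw [loopHit_false_left pvWeakGroups pvWeakKeys s t weak_sub hs,
       getD_weak_of_not_mem s hs]
    simp [PySem.Set.inter]

-- ===== VERDICT (by name: the statement is the Claim_ definition above) =====
theorem clustal_like_symbol_py_spec : Claim_equal_clustal_like_symbol_py := by
  intro a b _
  unfold Spec_clustal_like_symbol_py clustal_like_symbol_py clustal_like_symbol_py_alt
  simp only [← strong_iff, ← weak_iff]
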